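-- pv_equiv track=rewrite | github.com/NagahShinawy/problem-solving | pynative/5_strings/ex_4.py | rearrange_letters
-- ===== SOURCE A (Python) =====
-- def rearrange_letters(string: str):
--     lowers = ""
--     uppers = ""
--     for letter in string:
--         if letter.islower():
--             lowers += letter
--         else:
--             uppers += letter
--
--     return lowers + uppers
-- ===== SOURCE B (Python) =====
-- def rearrange_letters(string: str):
--     return "".join(sorted(string, key=lambda c: not c.islower()))
-- ===== Notes on version B (the rewrite author's own statement) =====
-- stated objective: idiomatic
-- what changed: Replaces the explicit two-accumulator partition loop with a single stable sort keyed on whether the character is not lowercase, then a join; stability preserves each group's original order.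
import Mathlib
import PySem

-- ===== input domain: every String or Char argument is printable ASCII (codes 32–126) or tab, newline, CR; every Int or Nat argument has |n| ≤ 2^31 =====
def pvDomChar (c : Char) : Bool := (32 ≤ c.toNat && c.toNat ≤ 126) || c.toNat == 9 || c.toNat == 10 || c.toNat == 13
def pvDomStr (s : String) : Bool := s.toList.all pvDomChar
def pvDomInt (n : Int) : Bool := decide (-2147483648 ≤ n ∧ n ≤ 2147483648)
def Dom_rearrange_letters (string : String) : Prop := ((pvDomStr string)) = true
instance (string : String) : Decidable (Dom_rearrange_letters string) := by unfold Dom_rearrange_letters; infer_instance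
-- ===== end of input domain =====

-- B replaces A's two-accumulator partition loop with one stable sort keyed on "is not lowercase" (idiomatic; not claimed faster).

-- ===== PORT A =====
-- A's loop: two string accumulators, appended char by char, then concatenated.
def rearrange_letters (string : String) : String :=
  let p := string.toList.foldl
    (fun (acc : List Char × List Char) letter =>
      if PySem.Chars.islower letter then (acc.1 ++ [letter], acc.2)
      else (acc.1, acc.2 ++ [letter]))
    ([], [])
  String.ofList (p.1 ++ p.2)

-- ===== PORT B =====
-- Source B: "".join(sorted(string, key=lambda c: not c.islower())); the Bool key is ported as 0/1.
def rearrange_letters_alt (string : String) : String :=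
  String.ofList (PySem.List.sorted string.toList (fun c => if PySem.Chars.islower c then (0 : Nat) else 1))

-- ===== PRECONDITION & SPEC =====
def Spec_rearrange_letters (string : String) (out : String) : Prop := out = rearrange_letters_alt string
instance (string : String) (out : String) : Decidable (Spec_rearrange_letters string out) := by unfold Spec_rearrange_letters; infer_instance

-- ===== CLAIM (what is proved, stated in full; the proofs are below) =====
def Claim_equal_rearrange_letters : Prop := ∀ (string : String), Dom_rearrange_letters string → Spec_rearrange_letters string (rearrange_letters string)

-- ===== LEMMAS AND PROOFS =====

-- abbreviations used only by the proofs
def pvKey (c : Char) : Nat := if PySem.Chars.islower c then 0 else 1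
def pvIns (acc : List Char) (x : Char) : List Char :=
  PySem.List.insertBy (fun a b => decide (pvKey a < pvKey b)) x acc

-- inserting x between a prefix it does not go before and a suffix it goes before
theorem insertBy_middle (before : Char → Char → Bool) (x : Char) :
    ∀ (L H : List Char), (∀ y ∈ L, before x y = false) → (∀ h ∈ H, before x h = true) →
    PySem.List.insertBy before x (L ++ H) = L ++ x :: H := by
  intro L
  induction L with
  | nil =>
    intro H _ hH
    cases H with
    | nil => simp [PySem.List.insertBy]
    | cons h t => simp [PySem.List.insertBy, hH h (by simp)]
  | cons y L ih =>
    intro H hL hH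
    have hy : before x y = false := hL y (by simp)
    simp only [List.cons_append, PySem.List.insertBy, hy]
    simp [ih H (fun z hz => hL z (by simp [hz])) hH]

theorem insertBy_end (before : Char → Char → Bool) (x : Char) :
    ∀ (ys : List Char), (∀ y ∈ ys, before x y = false) →
    PySem.List.insertBy before x ys = ys ++ [x] := by
  intro ys
  induction ys with
  | nil => intro _; simp [PySem.List.insertBy]
  | cons y t ih =>
    intro h
    simp only [PySem.List.insertBy, h y (by simp)]
    simp [ih (fun z hz => h z (by simp [hz]))]

-- the insertion-sort fold partitions: invariant over the accumulator L ++ H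
theorem foldl_ins_partition :
    ∀ (xs L H : List Char), (∀ c ∈ L, PySem.Chars.islower c = true) →
      (∀ c ∈ H, PySem.Chars.islower c = false) →
      xs.foldl pvIns (L ++ H) =
        (L ++ xs.filter (fun c => PySem.Chars.islower c)) ++
        (H ++ xs.filter (fun c => !PySem.Chars.islower c)) := by
  intro xs
  induction xs with
  | nil => intro L H _ _; simp
  | cons x xs ih =>
    intro L H hL hH
    by_cases hx : PySem.Chars.islower x = true
    · have step : pvIns (L ++ H) x = (L ++ [x]) ++ H := by
        have := insertBy_middle (fun a b => decide (pvKey a < pvKey b)) x L H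
          (fun y hy => by simp [pvKey, hx, hL y hy])
          (fun h hh => by simp [pvKey, hx, hH h hh])
        simpa [pvIns] using this
      have := ih (L ++ [x]) H
        (fun c hc => by rcases List.mem_append.1 hc with h | h
                        · exact hL c h
                        · simp at h; simpa [h] using hx) hH
      simp only [List.foldl_cons, step, this, List.filter_cons, hx]
      simp
    · have hx' : PySem.Chars.islower x = false := by simpa using hx
      have step : pvIns (L ++ H) x = L ++ (H ++ [x]) := by
        have := insertBy_end (fun a b => decide (pvKey a < pvKey b)) x (L ++ H)
          (fun y hy => by
            rcases List.mem_append.1 hy with h | h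
            · simp [pvKey, hx', hL y h]
            · simp [pvKey, hx', hH y h])
        simpa [pvIns] using this
      have := ih L (H ++ [x]) hL
        (fun c hc => by rcases List.mem_append.1 hc with h | h
                        · exact hH c h
                        · simp at h; simpa [h] using hx')
      simp only [List.foldl_cons, step, this, List.filter_cons, hx']
      simp
  
-- sorted with the 0/1 key is the stable partition
theorem sorted_partition (xs : List Char) :
    PySem.List.sorted xs pvKey =
      xs.filter (fun c => PySem.Chars.islower c) ++ xs.filter (fun c => !PySem.Chars.islower c) := by
  rw [PySem.List.sorted_eq_foldl_insertBy]
  have := foldl_ins_partition xs [] [] (by simp) (by simp)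
  simpa [pvIns] using this

-- A's fold computes the pair of filters
theorem foldA_eq_filters :
    ∀ (xs lo hi : List Char),
      xs.foldl
        (fun (acc : List Char × List Char) letter =>
          if PySem.Chars.islower letter then (acc.1 ++ [letter], acc.2)
          else (acc.1, acc.2 ++ [letter])) (lo, hi) =
      (lo ++ xs.filter (fun c => PySem.Chars.islower c),
       hi ++ xs.filter (fun c => !PySem.Chars.islower c)) := by
  intro xs
  induction xs with
  | nil => intro lo hi; simp
  | cons x xs ih =>
    intro lo hi
    by_cases hx : PySem.Chars.islower x = true
    · simp [hx, ih]
    · have hx' : PySem.Chars.islower x = false := by simpa using hx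
      simp [hx', ih]

-- ===== VERDICT (by name: the statement is the Claim_ definition above) =====
theorem rearrange_letters_spec : Claim_equal_rearrange_letters := by
  intro s _
  unfold Spec_rearrange_letters rearrange_letters rearrange_letters_alt
  have h := foldA_eq_filters s.toList [] []
  simp only [h]
  have : (fun c => if PySem.Chars.islower c then (0 : Nat) else 1) = pvKey := rfl
  rw [this, sorted_partition]
  simp
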